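-- pv_equiv track=rewrite | github.com/rrintjem/Advent2024 | day4.py | formatArrays
-- ===== SOURCE A (Python) =====
-- import copy
--
-- def formatArrays(data):
--     data_vertical = copy.deepcopy(data)
--     data_vertical = list(zip(*data_vertical[::-1]))
--
--     data_diag_1 = copy.deepcopy(data)
--     data_diag_2 = copy.deepcopy(data_vertical)
--
--     data_diag_1  =  rotate_array(data_diag_1)
--     data_diag_2  =  rotate_array(data_diag_2)
--
--     data = data + data_vertical + data_diag_1 + data_diag_2
--
--     return [''.join(str(x) for x in d) for d in data]
--
-- def rotate_array(mat):
--     rows = len(mat)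
--     cols = len(mat[0])
--     diags = [[mat[sum_-k][k]
--           for k in range(sum_ + 1)
--           if (sum_ - k) < rows and k < cols]
--          for sum_ in range(rows + cols - 1)]
--     return diags
-- ===== SOURCE B (Python) =====
-- def formatArrays(data):
--     vertical = list(zip(*data[::-1]))
--
--     def diag_buckets(mat):
--         # one pass over the cells: bucket i + j collects an anti-diagonal;
--         # scanning rows bottom-up makes each bucket come out in ascending column order
--         if not mat:
--             return []
--         rows, cols = len(mat), len(mat[0])
--         buckets = {}
--         for i in range(rows - 1, -1, -1):
--             row = mat[i]
--             for j in range(cols):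
--                 buckets.setdefault(i + j, []).append(row[j])
--         return [buckets.get(s, []) for s in range(rows + cols - 1)]
--
--     blocks = list(data) + vertical + diag_buckets(data) + diag_buckets(vertical)
--     return [''.join(str(x) for x in d) for d in blocks]
-- ===== Notes on version B (the rewrite author's own statement) =====
-- stated objective: alternative
-- what changed: Replaces rotate_array's per-diagonal comprehension (which rescans k in range(sum_+1) with guards for every diagonal) and the two deepcopies with a single pass over the cells that appends each cell into a dict bucket keyed by i+j, scanning rows bottom-up so buckets come out in A's exact order.
-- crash fix: On an empty grid or a grid whose first row is empty, A raises IndexError (rotate_array indexes mat[0] / past short rows); B returns the naturally formatted blocks (the empty list for an empty grid). — e.g. on formatArrays([]): A raises IndexError, B returns []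
import Mathlib
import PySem

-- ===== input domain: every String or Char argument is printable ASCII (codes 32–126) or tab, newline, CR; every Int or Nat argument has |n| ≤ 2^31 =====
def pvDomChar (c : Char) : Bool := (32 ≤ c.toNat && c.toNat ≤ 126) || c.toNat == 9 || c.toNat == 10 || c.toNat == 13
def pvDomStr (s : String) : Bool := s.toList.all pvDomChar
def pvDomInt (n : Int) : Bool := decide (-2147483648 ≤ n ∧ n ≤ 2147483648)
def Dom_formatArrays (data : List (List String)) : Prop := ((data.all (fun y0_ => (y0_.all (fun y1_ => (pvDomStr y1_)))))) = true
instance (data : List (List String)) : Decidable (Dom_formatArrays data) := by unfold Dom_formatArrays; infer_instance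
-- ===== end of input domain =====

-- B replaces rotate_array's per-diagonal guarded scans (and A's two deepcopies) with one
-- pass over the cells into dict buckets keyed by i+j (objective: alternative algorithm).


-- ===== PORT A =====

-- mat[i][j]; the "" / [] defaults are reached only where Python raises IndexError (outside Pre_)
def pyCell (mat : List (List String)) (i j : Nat) : String := (mat.getD i []).getD j ""

-- shared helper: BOTH Pythons compute `list(zip(*data[::-1]))` by this exact expression;
-- zip(*rows) takes one element from every row until some row is exhausted
-- (fuel = length of the first row bounds the number of iterations exactly)
def pyZipGo : Nat → List (List String) → List (List String)
  | 0, _ => []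
  | fuel + 1, ls =>
    if ls = [] ∨ ls.any (fun r => r.isEmpty) then []
    else (ls.map (fun r => r.headD "")) :: pyZipGo fuel (ls.map (fun r => r.tail))

def pyZipStar (ls : List (List String)) : List (List String) :=
  pyZipGo (ls.headD []).length ls

-- rotate_array: diagonal sum_ collects mat[sum_-k][k] for k ascending, guarded
def rotateArray (mat : List (List String)) : List (List String) :=
  let rows := mat.length
  let cols := (mat.headD []).length
  (List.range (rows + cols - 1)).map (fun s =>
    (List.range (s + 1)).filterMap (fun k =>
      if s - k < rows ∧ k < cols then some (pyCell mat (s - k) k) else none))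

-- ''.join(str(x) for x in d) over a row of strings
def pyJoinRow (d : List String) : String := PySem.Str.join "" d

def formatArrays (data : List (List String)) : List String :=
  let dataVertical := pyZipStar data.reverse
  let dataDiag1 := rotateArray data
  let dataDiag2 := rotateArray dataVertical
  (((data ++ dataVertical) ++ dataDiag1) ++ dataDiag2).map pyJoinRow

-- ===== PORT B =====

-- one pass over the cells, rows bottom-up: buckets.setdefault(i+j, []).append(row[j]),
-- then emit buckets.get(s, []) for s in range(rows+cols-1)
def diagBuckets (mat : List (List String)) : List (List String) :=
  if mat = [] then []
  else
    let rows := mat.length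
    let cols := (mat.headD []).length
    let buckets : PySem.Dict Nat (List String) :=
      ((List.range rows).reverse).foldl
        (fun d i => (List.range cols).foldl
          (fun d j => d.modify (i + j) [] (fun b => b ++ [pyCell mat i j])) d)
        PySem.Dict.empty
    (List.range (rows + cols - 1)).map (fun s => buckets.getD s [])

def formatArrays_alt (data : List (List String)) : List String :=
  let vertical := pyZipStar data.reverse
  let blocks := ((data ++ vertical) ++ diagBuckets data) ++ diagBuckets vertical
  blocks.map pyJoinRow

-- ===== PRECONDITION & SPEC =====

-- exactly the inputs on which Python A returns normally: a nonempty grid whose first row is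
-- nonempty and no shorter than any other row (otherwise rotate_array raises IndexError)
def Pre_formatArrays (data : List (List String)) : Prop :=
  data.headD [] ≠ [] ∧ ∀ r ∈ data, (data.headD []).length ≤ r.length

instance (data : List (List String)) : Decidable (Pre_formatArrays data) := by
  unfold Pre_formatArrays; infer_instance

def pvWitness_formatArrays : List (List String) := [["a", "b"], ["c", "d"]]

-- On an empty grid or a grid whose first row is empty, A raises IndexError
-- (rotate_array indexes mat[0]); B returns the naturally formatted blocks.
def Raises_formatArrays (data : List (List String)) : Prop := data.headD [] = []

instance (data : List (List String)) : Decidable (Raises_formatArrays data) := by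
  unfold Raises_formatArrays; infer_instance

def pvRaiseWitness_formatArrays : List (List String) := []
def pvRaiseWitnessOut_formatArrays : List String := []

def Spec_formatArrays (data : List (List String)) (out : List String) : Prop := out = formatArrays_alt data
instance (data : List (List String)) (out : List String) : Decidable (Spec_formatArrays data out) := by unfold Spec_formatArrays; infer_instance

-- ===== CLAIM (what is proved, stated in full; the proofs are below) =====
def Claim_equal_formatArrays : Prop := ∀ (data : List (List String)), Dom_formatArrays data → Pre_formatArrays data → Spec_formatArrays data (formatArrays data)

def Claim_raises_formatArrays : Prop := (∀ (data : List (List String)), Dom_formatArrays data → Raises_formatArrays data → ¬ Pre_formatArrays data) ∧ (Dom_formatArrays (pvRaiseWitness_formatArrays) ∧ Raises_formatArrays (pvRaiseWitness_formatArrays) ∧ formatArrays_alt (pvRaiseWitness_formatArrays) = pvRaiseWitnessOut_formatArrays)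

-- ===== LEMMAS AND PROOFS =====

-- step lemma: raising the row bound from r to r+1 prepends the k = s-r cell (when valid)
lemma rhs_step (mat : List (List String)) (cols s r : Nat) (hr : r ≤ s) :
    (List.range (s + 1)).filterMap
        (fun k => if s - k < r + 1 ∧ k < cols then some (pyCell mat (s - k) k) else none)
      = (if s - r < cols then [pyCell mat r (s - r)] else []) ++
        (List.range (s + 1)).filterMap
          (fun k => if s - k < r ∧ k < cols then some (pyCell mat (s - k) k) else none) := by
  have hnil : (List.range (s - r)).filterMap
      (fun k => if s - k < r + 1 ∧ k < cols then some (pyCell mat (s - k) k) else none) = [] :=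
    List.filterMap_eq_nil_iff.mpr (fun k hk => by
      rw [List.mem_range] at hk; rw [if_neg (by omega)])
  have hnil2 : (List.range (s - r + 1)).filterMap
      (fun k => if s - k < r ∧ k < cols then some (pyCell mat (s - k) k) else none) = [] :=
    List.filterMap_eq_nil_iff.mpr (fun k hk => by
      rw [List.mem_range] at hk; rw [if_neg (by omega)])
  have hsplit : s + 1 = (s - r) + (r + 1) := by omega
  conv_lhs => rw [hsplit, List.range_add]
  rw [List.filterMap_append, hnil, List.nil_append, List.filterMap_map]
  have hsplit2 : s + 1 = (s - r + 1) + r := by omega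
  conv_rhs => rw [hsplit2, List.range_add]
  rw [List.filterMap_append, hnil2, List.nil_append, List.filterMap_map]
  rw [List.range_succ_eq_map, List.filterMap_cons, List.filterMap_map]
  simp only [Function.comp, Nat.add_zero]
  rw [show s - (s - r) = r from by omega]
  have hcongr : (List.range r).filterMap
      (fun t => if s - (s - r + Nat.succ t) < r + 1 ∧ s - r + Nat.succ t < cols then
          some (pyCell mat (s - (s - r + Nat.succ t)) (s - r + Nat.succ t)) else none)
      = (List.range r).filterMap
      (fun t => if s - (s - r + 1 + t) < r ∧ s - r + 1 + t < cols then
          some (pyCell mat (s - (s - r + 1 + t)) (s - r + 1 + t)) else none) := by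
    refine List.filterMap_congr (fun t ht => ?_)
    rw [List.mem_range] at ht
    rw [show s - r + Nat.succ t = s - r + 1 + t from by omega]
    exact if_congr (by omega) rfl rfl
  rw [hcongr]
  by_cases hc : s - r < cols
  · rw [if_pos (by omega : r < r + 1 ∧ s - r < cols), if_pos hc]
    rfl
  · rw [if_neg (by omega : ¬(r < r + 1 ∧ s - r < cols)), if_neg hc]
    rfl

lemma reindex (mat : List (List String)) (cols s : Nat) : ∀ rows : Nat,
    (List.range rows).reverse.filterMap
        (fun i => if i ≤ s ∧ s - i < cols then some (pyCell mat i (s - i)) else none)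
      = (List.range (s + 1)).filterMap
        (fun k => if s - k < rows ∧ k < cols then some (pyCell mat (s - k) k) else none) := by
  intro rows
  induction rows with
  | zero =>
    simp only [List.range_zero, List.reverse_nil, List.filterMap_nil]
    symm
    exact List.filterMap_eq_nil_iff.mpr (fun k _ => by rw [if_neg (by omega)])
  | succ r ih =>
    rw [List.range_succ, List.reverse_append, List.reverse_singleton, List.singleton_append]
    by_cases hr : r ≤ s
    · rw [rhs_step mat cols s r hr, ← ih]
      by_cases hc : s - r < cols
      · rw [List.filterMap_cons_some (by rw [if_pos ⟨hr, hc⟩]), if_pos hc]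
        rfl
      · rw [List.filterMap_cons_none (by rw [if_neg (fun h => hc h.2)]), if_neg hc]
        rfl
    · rw [List.filterMap_cons_none (by rw [if_neg (fun h => hr h.1)]), ih]
      exact List.filterMap_congr (fun k hk => by
        rw [List.mem_range] at hk
        exact if_congr (by omega) rfl rfl)

lemma filter_range_hit (i s cols : Nat) :
    (List.range cols).filter (fun j => i + j == s) =
      if i ≤ s ∧ s - i < cols then [s - i] else [] := by
  induction cols with
  | zero => simp
  | succ c ih =>
    rw [List.range_succ, List.filter_append, ih]
    by_cases h : i + c = s
    · rw [if_neg (by omega), if_pos (by omega)]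
      simp [h]
      omega
    · rw [if_congr (by omega : (i ≤ s ∧ s - i < c) ↔ (i ≤ s ∧ s - i < c + 1)) rfl rfl]
      simp [h]

lemma bucket_chain (mat : List (List String)) (rows cols s : Nat) :
    (((List.range rows).reverse).foldl
        (fun d i => (List.range cols).foldl
          (fun d j => d.modify (i + j) [] (fun b => b ++ [pyCell mat i j])) d)
        (PySem.Dict.empty : PySem.Dict Nat (List String))).getD s []
      = (List.range rows).reverse.filterMap
          (fun i => if i ≤ s ∧ s - i < cols then some (pyCell mat i (s - i)) else none) := by
  have h1 : ∀ (i : Nat) (d : PySem.Dict Nat (List String)),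
      (List.range cols).foldl (fun d j => d.modify (i + j) [] (fun b => b ++ [pyCell mat i j])) d
        = ((List.range cols).map (fun j => (i + j, pyCell mat i j))).foldl
            (fun d p => d.modify p.1 [] (fun b => b ++ [p.2])) d := by
    intro i d; rw [List.foldl_map]
  calc (((List.range rows).reverse).foldl
        (fun d i => (List.range cols).foldl
          (fun d j => d.modify (i + j) [] (fun b => b ++ [pyCell mat i j])) d)
        (PySem.Dict.empty : PySem.Dict Nat (List String))).getD s []
      = (((List.range rows).reverse.flatMap
            (fun i => (List.range cols).map (fun j => (i + j, pyCell mat i j)))).foldl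
            (fun d p => d.modify p.1 [] (fun b => b ++ [p.2]))
            (PySem.Dict.empty : PySem.Dict Nat (List String))).getD s [] := by
        simp only [h1]
        rw [← List.foldl_flatMap]
    _ = (((List.range rows).reverse.flatMap
            (fun i => (List.range cols).map (fun j => (i + j, pyCell mat i j)))).filter
            (fun p => p.1 == s)).map (fun p => p.2) := by
        rw [PySem.Dict.getD_foldl_modify_append]
        simp [PySem.Dict.getD_empty]
    _ = (List.range rows).reverse.flatMap
            (fun i => if i ≤ s ∧ s - i < cols then [pyCell mat i (s - i)] else []) := by
        rw [List.filter_flatMap, List.map_flatMap]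
        congr 1
        funext i
        rw [List.filter_map, List.map_map]
        have : ((fun p => p.1 == s) ∘ fun j => (i + j, pyCell mat i j)) = fun j => i + j == s := rfl
        rw [this, filter_range_hit]
        by_cases h : i ≤ s ∧ s - i < cols
        · rw [if_pos h, if_pos h]; rfl
        · rw [if_neg h, if_neg h]; rfl
    _ = (List.range rows).reverse.filterMap
          (fun i => if i ≤ s ∧ s - i < cols then some (pyCell mat i (s - i)) else none) := by
        rw [List.filterMap_eq_flatMap_toList]
        congr 1
        funext i
        by_cases h : i ≤ s ∧ s - i < cols
        · rw [if_pos h, if_pos h]; rfl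
        · rw [if_neg h, if_neg h]; rfl

lemma rotate_eq_buckets (mat : List (List String)) : rotateArray mat = diagBuckets mat := by
  by_cases hm : mat = []
  · subst hm; rfl
  · simp only [rotateArray, diagBuckets, if_neg hm]
    refine List.map_congr_left (fun s _ => ?_)
    rw [bucket_chain, ← reindex]

-- ===== VERDICT (by name: the statement is the Claim_ definition above) =====
theorem formatArrays_spec : Claim_equal_formatArrays := by
  intro data _ _
  show formatArrays data = formatArrays_alt data
  simp only [formatArrays, formatArrays_alt, rotate_eq_buckets]

theorem formatArrays_raises : Claim_raises_formatArrays := by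
  unfold Claim_raises_formatArrays
  refine ⟨?_, by decide⟩
  intro data _ hr hp
  exact hp.1 hr

-- self-check: the raise witness really lies in Raises_ and B's port returns the stated value there
theorem pvRaiseWitness_ok :
    Raises_formatArrays pvRaiseWitness_formatArrays ∧
      formatArrays_alt pvRaiseWitness_formatArrays = pvRaiseWitnessOut_formatArrays := by
  have h := formatArrays_raises
  unfold Claim_raises_formatArrays at h
  exact ⟨h.2.2.1, h.2.2.2⟩
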